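-- pv_equiv track=rewrite | github.com/XianghuiMeng-1020/skillsight | backend/app/routers/assess.py | _level_from_hits
-- ===== SOURCE A (Python) =====
-- from typing import Any, Dict, List, Optional, Tuple
--
-- def _level_from_hits(hit_count: int, hits: List[str]) -> Tuple[int, str]:
--     """Determine proficiency level from hits."""
--     strong_keywords = {
--         "fastapi", "uvicorn", "sqlalchemy", "postgres", "psql", "consent", "pii",
--         "anonymize", "de", "identify", "deidentify", "de-identify", "gdpr",
--         "sha256", "hash", "citation", "plagiarism", "honesty"
--     }
--     strong_hits = [h for h in hits if h in strong_keywords]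
--
--     if hit_count <= 0:
--         return 0, "no_match"
--     if hit_count <= 2:
--         return 1, "weak_match"
--     if hit_count <= 5:
--         return 2, "match"
--     if hit_count >= 6 or len(strong_hits) >= 2:
--         return 3, "strong_match"
--     return 2, "match"
-- ===== SOURCE B (Python) =====
-- def _level_from_hits(hit_count, hits):
--     """Determine proficiency level from hits via a boundary table.
--
--     (The original's strong_hits computation is dead code: its branch is
--     reachable only when hit_count >= 6, which already satisfies the test.)
--     """
--     bounds = [0, 2, 5]
--     levels = [(0, "no_match"), (1, "weak_match"), (2, "match"), (3, "strong_match")]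
--     idx = sum(1 for b in bounds if b < hit_count)
--     return levels[idx]
-- ===== Notes on version B (the rewrite author's own statement) =====
-- stated objective: idiomatic
-- what changed: Replaces the cascading if-chain plus a dead strong_hits set-membership scan over hits with a boundary-table lookup: count the bounds [0,2,5] below hit_count and index a level table.
import Mathlib
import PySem

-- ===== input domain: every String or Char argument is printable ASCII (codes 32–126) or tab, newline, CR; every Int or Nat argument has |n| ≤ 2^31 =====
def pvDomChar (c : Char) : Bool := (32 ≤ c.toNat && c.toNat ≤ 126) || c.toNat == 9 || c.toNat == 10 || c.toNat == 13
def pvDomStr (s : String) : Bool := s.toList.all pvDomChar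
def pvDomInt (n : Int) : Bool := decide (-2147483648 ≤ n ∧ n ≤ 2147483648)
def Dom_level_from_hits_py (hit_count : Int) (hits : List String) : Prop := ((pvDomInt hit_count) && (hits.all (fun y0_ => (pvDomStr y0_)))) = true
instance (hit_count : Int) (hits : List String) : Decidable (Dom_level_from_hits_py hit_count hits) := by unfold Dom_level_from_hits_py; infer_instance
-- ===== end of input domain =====

-- B replaces the if-chain and the dead strong_hits scan with a boundary-table lookup (idiomatic).


-- ===== PORT A =====
def level_from_hits_py (hit_count : Int) (hits : List String) : Int × String :=
  let strong_keywords : PySem.Set String := PySem.Set.ofList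
    ["fastapi", "uvicorn", "sqlalchemy", "postgres", "psql", "consent", "pii",
     "anonymize", "de", "identify", "deidentify", "de-identify", "gdpr",
     "sha256", "hash", "citation", "plagiarism", "honesty"]
  let strong_hits := hits.filter (fun h => PySem.Set.contains strong_keywords h)
  if hit_count ≤ 0 then (0, "no_match")
  else if hit_count ≤ 2 then (1, "weak_match")
  else if hit_count ≤ 5 then (2, "match")
  else if hit_count ≥ 6 ∨ (strong_hits.length : Int) ≥ 2 then (3, "strong_match")
  else (2, "match")

-- ===== PORT B =====
-- boundary-table classification; idx ≤ 3 always, so the table index is in range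
def level_from_hits_py_alt (hit_count : Int) (hits : List String) : Int × String :=
  let bounds : List Int := [0, 2, 5]
  let levels : List (Int × String) := [(0, "no_match"), (1, "weak_match"), (2, "match"), (3, "strong_match")]
  let idx := (bounds.filter (fun b => b < hit_count)).length
  levels.getD idx (0, "no_match")

-- ===== PRECONDITION & SPEC =====
def Spec_level_from_hits_py (hit_count : Int) (hits : List String) (out : Int × String) : Prop := out = level_from_hits_py_alt hit_count hits
instance (hit_count : Int) (hits : List String) (out : Int × String) : Decidable (Spec_level_from_hits_py hit_count hits out) := by unfold Spec_level_from_hits_py; infer_instance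

-- ===== CLAIM (what is proved, stated in full; the proofs are below) =====
def Claim_equal_level_from_hits_py : Prop := ∀ (hit_count : Int) (hits : List String), Dom_level_from_hits_py hit_count hits → Spec_level_from_hits_py hit_count hits (level_from_hits_py hit_count hits)

-- ===== LEMMAS AND PROOFS =====

-- ===== VERDICT (by name: the statement is the Claim_ definition above) =====
theorem level_from_hits_py_spec : Claim_equal_level_from_hits_py := by
  intro hit_count hits _
  unfold Spec_level_from_hits_py level_from_hits_py level_from_hits_py_alt
  simp only [List.filter]
  rcases h0 : decide ((0:Int) < hit_count) <;>
    rcases h2 : decide ((2:Int) < hit_count) <;>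
      rcases h5 : decide ((5:Int) < hit_count) <;>
        simp only [List.filter, h0, h2, h5] <;>
          split_ifs <;> simp_all <;> omega
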